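-- pv_equiv track=rewrite | github.com/pypi-data/pypi-mirror-272 | packages/wgd/wgd-2.0.38.tar.gz/wgd-2.0.38/wgd/core.py | getunique
-- ===== SOURCE A (Python) =====
-- def getunique(ids,sps,idmap,pros):
--     d = {}
--     leng = lambda n: len(pros[idmap[n]])
--     for i,s in zip(ids,sps):
--         if d.get(s) == None: d[s] = i
--         elif leng(i) > leng(d[s]): d[s] = i
--     d.update({'NestedType':'mostly single-copy'})
--     return d
-- ===== SOURCE B (Python) =====
-- def getunique(ids, sps, idmap, pros):
--     # group-then-reduce: build species -> [ids] table first, then pick per group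
--     groups = {}
--     for i, s in zip(ids, sps):
--         groups.setdefault(s, []).append(i)
--     leng = lambda n: len(pros[idmap[n]])
--     d = {}
--     for s, g in groups.items():
--         best = g[0]
--         for i in g[1:]:
--             if leng(i) > leng(best):
--                 best = i
--         d[s] = best
--     d['NestedType'] = 'mostly single-copy'
--     return d
-- ===== Notes on version B (the rewrite author's own statement) =====
-- stated objective: alternative
-- what changed: Replaces A's single pass keeping a running best id per species with a two-phase group-then-reduce: first build a species->list-of-ids table in one pass, then select each group's longest-protein id with an explicit max-style reduction.
import Mathlib
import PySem

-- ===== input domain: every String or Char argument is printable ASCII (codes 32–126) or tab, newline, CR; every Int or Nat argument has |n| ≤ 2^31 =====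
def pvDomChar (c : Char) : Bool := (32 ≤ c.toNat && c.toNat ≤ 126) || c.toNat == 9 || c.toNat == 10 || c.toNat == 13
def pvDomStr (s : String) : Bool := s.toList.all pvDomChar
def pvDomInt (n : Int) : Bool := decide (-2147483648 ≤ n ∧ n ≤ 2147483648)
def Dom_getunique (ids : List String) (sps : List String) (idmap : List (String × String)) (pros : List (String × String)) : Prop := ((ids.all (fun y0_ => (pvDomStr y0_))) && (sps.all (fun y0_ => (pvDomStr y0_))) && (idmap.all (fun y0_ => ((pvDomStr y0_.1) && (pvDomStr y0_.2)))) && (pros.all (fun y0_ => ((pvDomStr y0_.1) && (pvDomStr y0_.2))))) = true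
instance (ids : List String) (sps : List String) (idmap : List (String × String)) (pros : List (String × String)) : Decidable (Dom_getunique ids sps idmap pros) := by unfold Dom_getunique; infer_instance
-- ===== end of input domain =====

-- B replaces A's running-best single pass by an explicit group-then-reduce over a species→ids table (same cost, different decomposition).

-- leng = lambda n: len(pros[idmap[n]])  (total form; Pre_ guarantees the lookups succeed wherever it is reached)
def pvLeng (idmap : List (String × String)) (pros : List (String × String)) (n : String) : Int :=
  PySem.Str.len ((PySem.Dict.mk pros).getD ((PySem.Dict.mk idmap).getD n "") "")

-- ===== PORT A =====
def getunique (ids : List String) (sps : List String) (idmap : List (String × String)) (pros : List (String × String)) : List (String × String) :=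
  (((ids.zip sps).foldl (fun d p =>
      match d.get? p.2 with
      | none => d.insert p.2 p.1
      | some cur => if pvLeng idmap pros p.1 > pvLeng idmap pros cur then d.insert p.2 p.1 else d)
    (PySem.Dict.empty : PySem.Dict String String)).insert "NestedType" "mostly single-copy").items

-- ===== PORT B =====
-- the inner loop of Source B: best = g[0]; for i in g[1:]: if leng(i) > leng(best): best = i
def pvBest (idmap : List (String × String)) (pros : List (String × String)) (g : List String) : String :=
  match g with
  | [] => ""   -- unreachable: every group is nonempty
  | h :: t => t.foldl (fun b i => if pvLeng idmap pros i > pvLeng idmap pros b then i else b) h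

def getunique_alt (ids : List String) (sps : List String) (idmap : List (String × String)) (pros : List (String × String)) : List (String × String) :=
  (((((ids.zip sps).foldl (fun g p => g.modify p.2 [] (fun l => l ++ [p.1]))
    (PySem.Dict.empty : PySem.Dict String (List String))).items).foldl
      (fun d sg => d.insert sg.1 (pvBest idmap pros sg.2))
      (PySem.Dict.empty : PySem.Dict String String)).insert "NestedType" "mostly single-copy").items

-- ===== PRECONDITION & SPEC =====
def pvResolves (idmap : List (String × String)) (pros : List (String × String)) (n : String) : Bool :=
  (((PySem.Dict.mk idmap).get? n).bind (fun k => (PySem.Dict.mk pros).get? k)).isSome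

-- Pre_ excludes exactly the inputs where the Python A raises a KeyError: an id whose species occurs
-- at least twice in zip(ids,sps) but which does not resolve through idmap and then pros.
def Pre_getunique (ids : List String) (sps : List String) (idmap : List (String × String)) (pros : List (String × String)) : Prop :=
  ∀ p ∈ ids.zip sps, 2 ≤ ((ids.zip sps).filter (fun q => q.2 == p.2)).length → pvResolves idmap pros p.1 = true
instance (ids : List String) (sps : List String) (idmap : List (String × String)) (pros : List (String × String)) : Decidable (Pre_getunique ids sps idmap pros) := by unfold Pre_getunique; infer_instance

def pvWitness_getunique : List String × List String × (List (String × String)) × (List (String × String)) :=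
  (["x", "y"], ["s", "s"], [("x", "g"), ("y", "h")], [("g", "MM"), ("h", "PPP")])

def Spec_getunique (ids : List String) (sps : List String) (idmap : List (String × String)) (pros : List (String × String)) (out : List (String × String)) : Prop := out = getunique_alt ids sps idmap pros
instance (ids : List String) (sps : List String) (idmap : List (String × String)) (pros : List (String × String)) (out : List (String × String)) : Decidable (Spec_getunique ids sps idmap pros out) := by unfold Spec_getunique; infer_instance

-- ===== CLAIM (what is proved, stated in full; the proofs are below) =====
def Claim_equal_getunique : Prop := ∀ (ids : List String) (sps : List String) (idmap : List (String × String)) (pros : List (String × String)), Dom_getunique ids sps idmap pros → Pre_getunique ids sps idmap pros → Spec_getunique ids sps idmap pros (getunique ids sps idmap pros)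

-- ===== LEMMAS AND PROOFS =====

-- A's running-best dict is the value-wise image of B's grouping dict under pvBest.
def pvF (idmap : List (String × String)) (pros : List (String × String)) (g : PySem.Dict String (List String)) : PySem.Dict String String :=
  PySem.Dict.mk (g.items.map (fun p => (p.1, pvBest idmap pros p.2)))

theorem pvF_keys (im pr : List (String × String)) (g : PySem.Dict String (List String)) :
    (pvF im pr g).keys = g.keys := by
  simp only [pvF, PySem.Dict.keys, List.map_map]
  rfl

theorem pvF_contains (im pr : List (String × String)) (g : PySem.Dict String (List String)) (k : String) :
    (pvF im pr g).contains k = g.contains k := by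
  rw [PySem.Dict.contains_eq_decide_mem_keys, PySem.Dict.contains_eq_decide_mem_keys, pvF_keys]

theorem pvF_items (im pr : List (String × String)) (g : PySem.Dict String (List String)) :
    (pvF im pr g).items = g.items.map (fun p => (p.1, pvBest im pr p.2)) := rfl

theorem pvF_get?_aux (im pr : List (String × String)) (items : List (String × List String)) (k : String) :
    (PySem.Dict.mk (items.map (fun p => (p.1, pvBest im pr p.2)))).get? k
      = ((PySem.Dict.mk items).get? k).map (pvBest im pr) := by
  induction items with
  | nil => rfl
  | cons p t ih =>
    rw [List.map_cons, PySem.Dict.get?_mk_cons, PySem.Dict.get?_mk_cons]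
    by_cases h : (p.1 == k) = true
    · rw [if_pos h, if_pos h]; rfl
    · rw [if_neg h, if_neg h]; exact ih

theorem pvF_get? (im pr : List (String × String)) (g : PySem.Dict String (List String)) (k : String) :
    (pvF im pr g).get? k = (g.get? k).map (pvBest im pr) := by
  obtain ⟨items⟩ := g
  exact pvF_get?_aux im pr items k

theorem pvF_insert (im pr : List (String × String)) (g : PySem.Dict String (List String)) (k : String) (v : List String) :
    pvF im pr (g.insert k v) = (pvF im pr g).insert k (pvBest im pr v) := by
  apply PySem.Dict.ext
  rw [pvF_items, PySem.Dict.items_insert g, PySem.Dict.items_insert (pvF im pr g), pvF_contains,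
    pvF_items]
  by_cases h : g.contains k = true
  · rw [if_pos h, if_pos h, List.map_map, List.map_map]
    apply List.map_congr_left
    intro p _
    by_cases hp : p.1 = k
    · simp [hp]
    · simp [hp]
  · rw [if_neg h, if_neg h, List.map_append]
    simp

theorem insert_self_aux (items : List (String × String)) (k v : String)
    (hnd : (items.map Prod.fst).Nodup) (h : (PySem.Dict.mk items).get? k = some v) :
    items.map (fun p => if p.1 == k then (k, v) else p) = items := by
  induction items with
  | nil => simp [PySem.Dict.get?] at h
  | cons p t ih =>
    simp only [List.map_cons, List.nodup_cons] at hnd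
    rw [PySem.Dict.get?_mk_cons] at h
    by_cases hp : p.1 == k
    · have hk : p.1 = k := by simpa using hp
      simp only [hp, if_true] at h
      have hv : p.2 = v := by simpa using h
      simp only [List.map_cons, hp, if_true]
      have ht : t.map (fun q => if q.1 == k then (k, v) else q) = t := by
        have hcongr : t.map (fun q => if q.1 == k then (k, v) else q) = t.map id :=
          List.map_congr_left (fun q hq => by
            have hqk : q.1 ≠ k := fun hqk =>
              hnd.1 (by rw [hk, ← hqk]; exact List.mem_map_of_mem hq)
            simp [hqk])
        simpa using hcongr
      rw [ht, ← hk, ← hv]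
    · simp only [hp, Bool.false_eq_true, if_neg, not_false_iff] at h
      simp only [List.map_cons, hp, Bool.false_eq_true, if_neg, not_false_iff]
      rw [ih hnd.2 h]

theorem insert_self_of_get? (d : PySem.Dict String String) (k v : String)
    (hnd : d.keys.Nodup) (h : d.get? k = some v) : d.insert k v = d := by
  apply PySem.Dict.ext
  have hc : d.contains k := by
    rw [PySem.Dict.contains_eq_isSome_get?, h]; rfl
  rw [PySem.Dict.items_insert, if_pos hc]
  obtain ⟨items⟩ := d
  exact insert_self_aux items k v hnd h

theorem pvBest_append (im pr : List (String × String)) (g : List String) (i : String) (hg : g ≠ []) :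
    pvBest im pr (g ++ [i])
      = if pvLeng im pr i > pvLeng im pr (pvBest im pr g) then i else pvBest im pr g := by
  obtain ⟨h, t, rfl⟩ := List.exists_cons_of_ne_nil hg
  simp [pvBest, List.foldl_append]

theorem pvMain (im pr : List (String × String)) (z : List (String × String)) :
    ∀ (g : PySem.Dict String (List String)), g.keys.Nodup → (∀ p ∈ g.items, p.2 ≠ []) →
    z.foldl (fun d p =>
      match d.get? p.2 with
      | none => d.insert p.2 p.1
      | some cur => if pvLeng im pr p.1 > pvLeng im pr cur then d.insert p.2 p.1 else d) (pvF im pr g)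
      = pvF im pr (z.foldl (fun g p => g.modify p.2 [] (fun l => l ++ [p.1])) g) := by
  induction z with
  | nil => intro g _ _; rfl
  | cons q z ih =>
    intro g hnd hne
    have hmod : g.modify q.2 [] (fun l => l ++ [q.1]) = g.insert q.2 (g.getD q.2 [] ++ [q.1]) := rfl
    simp only [List.foldl_cons]
    cases hq : g.get? q.2 with
    | none =>
      have hgd : g.getD q.2 [] = [] := PySem.Dict.getD_of_get?_eq_none _ _ hq
      have hF : (pvF im pr g).get? q.2 = none := by rw [pvF_get?, hq]; rfl
      have step : (match (pvF im pr g).get? q.2 with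
          | none => (pvF im pr g).insert q.2 q.1
          | some cur => if pvLeng im pr q.1 > pvLeng im pr cur then (pvF im pr g).insert q.2 q.1 else pvF im pr g)
          = pvF im pr (g.insert q.2 [q.1]) := by
        rw [hF, pvF_insert]; rfl
      rw [step, hmod, hgd]
      simp only [List.nil_append]
      apply ih
      · exact PySem.Dict.nodup_keys_insert g q.2 [q.1] hnd
      · intro p hp
        rcases (PySem.Dict.mem_items_insert _ _ _ _).1 hp with h1 | h2
        · rw [h1]; simp
        · exact hne p h2.1
    | some l =>
      have hl : l ≠ [] := hne (q.2, l) (PySem.Dict.mem_items_of_get?_eq_some g hq)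
      have hgd : g.getD q.2 [] = l := PySem.Dict.getD_of_get?_eq_some _ _ hq
      have hF : (pvF im pr g).get? q.2 = some (pvBest im pr l) := by rw [pvF_get?, hq]; rfl
      have step : (match (pvF im pr g).get? q.2 with
          | none => (pvF im pr g).insert q.2 q.1
          | some cur => if pvLeng im pr q.1 > pvLeng im pr cur then (pvF im pr g).insert q.2 q.1 else pvF im pr g)
          = pvF im pr (g.insert q.2 (l ++ [q.1])) := by
        rw [hF, pvF_insert, pvBest_append im pr l q.1 hl]
        by_cases hc : pvLeng im pr q.1 > pvLeng im pr (pvBest im pr l)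
        · simp [hc]
        · simp only [hc, if_neg, not_false_iff]
          exact (insert_self_of_get? (pvF im pr g) q.2 (pvBest im pr l)
            (by rw [pvF_keys]; exact hnd) hF).symm
      rw [step, hmod, hgd]
      apply ih
      · exact PySem.Dict.nodup_keys_insert g q.2 (l ++ [q.1]) hnd
      · intro p hp
        rcases (PySem.Dict.mem_items_insert _ _ _ _).1 hp with h1 | h2
        · rw [h1]; simp
        · exact hne p h2.1

theorem pvFold_items (im pr : List (String × String)) (d : PySem.Dict String (List String))
    (hnd : d.keys.Nodup) :
    d.items.foldl (fun acc sg => acc.insert sg.1 (pvBest im pr sg.2))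
      (PySem.Dict.empty : PySem.Dict String String) = pvF im pr d := by
  apply PySem.Dict.ext
  rw [PySem.Dict.items_foldl_insert_fresh (k := Prod.fst) (v := fun sg => pvBest im pr sg.2)
    (l := d.items) (d := PySem.Dict.empty)]
  · rfl
  · intro a _; exact PySem.Dict.contains_empty a.1
  · exact hnd

-- ===== VERDICT (by name: the statement is the Claim_ definition above) =====
theorem getunique_spec : Claim_equal_getunique := by
  intro ids sps idmap pros _ _
  unfold Spec_getunique getunique getunique_alt
  have hnd : ((ids.zip sps).foldl (fun g p => g.modify p.2 [] (fun l => l ++ [p.1]))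
      (PySem.Dict.empty : PySem.Dict String (List String))).keys.Nodup := by
    exact PySem.Dict.nodup_keys_foldl_modify_key (ids.zip sps) Prod.snd []
      (fun g p => fun l => l ++ [p.1]) PySem.Dict.empty PySem.Dict.nodup_keys_empty
  rw [pvFold_items idmap pros _ hnd]
  have h0 : (PySem.Dict.empty : PySem.Dict String String)
      = pvF idmap pros (PySem.Dict.empty : PySem.Dict String (List String)) := rfl
  rw [h0, pvMain idmap pros (ids.zip sps) PySem.Dict.empty PySem.Dict.nodup_keys_empty (by intro p hp; cases hp)]
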